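-- pv_equiv track=rewrite | github.com/shadowlightcode/automation-tests | codingbat/logic-2/round_sum.py | round_sum
-- ===== SOURCE A (Python) =====
-- def round_sum(a, b, c):
--     arr = []
--     arr.append(a)
--     arr.append(b)
--     arr.append(c)
--     for i in range(len(arr)):
--         leftovers = arr[i]%10
--         if leftovers >= 5:
--             arr[i] = arr[i]+10-leftovers
--         elif leftovers < 5:
--             arr[i] = arr[i]-leftovers
--     return arr[0] + arr[1] +arr[2]
-- ===== SOURCE B (Python) =====
-- def round_sum(a, b, c):
--     return sum(((x + 5) // 10) * 10 for x in (a, b, c))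
-- ===== Notes on version B (the rewrite author's own statement) =====
-- stated objective: simpler
-- what changed: Replaces the list-building loop and if/elif branch with the closed-form half-up rounding ((x+5)//10)*10 summed directly over the three arguments.
import Mathlib
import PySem

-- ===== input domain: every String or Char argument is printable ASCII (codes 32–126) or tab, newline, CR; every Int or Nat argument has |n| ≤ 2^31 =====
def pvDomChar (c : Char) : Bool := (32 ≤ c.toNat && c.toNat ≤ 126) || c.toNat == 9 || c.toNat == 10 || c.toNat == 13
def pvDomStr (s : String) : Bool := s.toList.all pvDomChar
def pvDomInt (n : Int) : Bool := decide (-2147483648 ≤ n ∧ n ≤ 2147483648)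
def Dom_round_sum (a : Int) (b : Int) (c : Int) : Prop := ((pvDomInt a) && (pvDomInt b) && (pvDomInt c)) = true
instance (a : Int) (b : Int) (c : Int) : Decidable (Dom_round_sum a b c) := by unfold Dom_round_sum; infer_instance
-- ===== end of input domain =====

-- B replaces A's list-building loop and if/elif rounding with the closed-form half-up formula ((x+5)//10)*10 summed directly (simpler).


-- ===== PORT A =====
def round_sum (a : Int) (b : Int) (c : Int) : Int :=
  let arr : List Int := [] ++ [a] ++ [b] ++ [c]
  -- the loop indices are 0..len-1, always in range, so arr[i] is (pyGet? i).getD 0 (the default is never used)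
  let arr := (PySem.List.pyRange 0 (arr.length : Int) 1).foldl (fun arr i =>
    let leftovers := PySem.Int.mod ((PySem.List.pyGet? arr i).getD 0) 10
    if leftovers ≥ 5 then
      arr.set i.toNat ((PySem.List.pyGet? arr i).getD 0 + 10 - leftovers)
    else if leftovers < 5 then
      arr.set i.toNat ((PySem.List.pyGet? arr i).getD 0 - leftovers)
    else arr) arr
  (PySem.List.pyGet? arr 0).getD 0 + (PySem.List.pyGet? arr 1).getD 0 + (PySem.List.pyGet? arr 2).getD 0

-- ===== PORT B =====
def round_sum_alt (a : Int) (b : Int) (c : Int) : Int :=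
  [a, b, c].foldl (fun s x => s + PySem.Int.floordiv (x + 5) 10 * 10) 0

-- ===== PRECONDITION & SPEC =====
def Spec_round_sum (a : Int) (b : Int) (c : Int) (out : Int) : Prop := out = round_sum_alt a b c
instance (a : Int) (b : Int) (c : Int) (out : Int) : Decidable (Spec_round_sum a b c out) := by unfold Spec_round_sum; infer_instance

-- ===== CLAIM (what is proved, stated in full; the proofs are below) =====
def Claim_equal_round_sum : Prop := ∀ (a : Int) (b : Int) (c : Int), Dom_round_sum a b c → Spec_round_sum a b c (round_sum a b c)

-- ===== LEMMAS AND PROOFS =====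
-- ===== VERDICT (by name: the statement is the Claim_ definition above) =====
-- the elif branch is exhaustive: collapse it so simp can resolve both polarities
theorem elif_collapse {A : Type} (m : Int) (X Y Z : A) :
    (if 5 ≤ m then X else if m < 5 then Y else Z) = if 5 ≤ m then X else Y := by
  split_ifs <;> first | rfl | omega

theorem round_sum_spec : Claim_equal_round_sum := by
  intro a b c _
  show round_sum a b c = round_sum_alt a b c
  unfold round_sum round_sum_alt
  by_cases ha : 5 ≤ a % 10 <;> by_cases hb : 5 ≤ b % 10 <;> by_cases hc : 5 ≤ c % 10 <;>
    simp [PySem.List.pyRange, show Int.toNat 3 = 3 from rfl, List.range_succ,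
      PySem.List.pyGet?, PySem.List.pyIdx?, elif_collapse, ha, hb, hc] <;>
    omega
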